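-- pv_equiv track=rewrite | github.com/ShawnYS-codemtl/mcgill-comp202 | assignment2/string_fun.py | get_nth_word_from_string
-- ===== SOURCE A (Python) =====
-- def get_nth_word_from_string(s, n):
--     ''' (str, int) -> str
--     Returns the nth comma separated substring in string s.
--
--     >>> get_nth_word_from_string("dreary, pondered, weak, weary", 0)
--     'dreary'
--
--     >>> get_nth_word_from_string("fall, stand, break, peace", 1)
--     'stand'
--
--     >>> get_nth_word_from_string("fall, stand, break, peace, shake", 2)
--     'break'
--
--     >>> get_nth_word_from_string("fall", 0)
--     'fall'
--
--     >>> get_nth_word_from_string("fall, stand, break, peace", 4)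
--     ''
--
--     '''
--     index_of_commas = [] # takes the indexes of the commas in the string s
--     nb_of_commas = 0
--     for i in range(len(s)):
--         if s[i] == ',':
--             index_of_commas.append(i)   # adds the index of the comma into index_of_commas
--             nb_of_commas += 1 # counts the number of commas
--
--     if n > nb_of_commas or n < 0: # checks if n is valid
--         return ''
--
--     elif n == 0: # for first substring in string s
--         if nb_of_commas == 0: # if there is no comma
--             return s
--         else:
--             return s[:index_of_commas[n]] # s[: first comma]
--
--     elif n > 0 and n <= nb_of_commas - 1: # for any substring in between first and last substring
--         return s[index_of_commas[n-1]+2:index_of_commas[n]]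
--         # [previous comma + 2 to skip the comma and space: next comma]
--
--     elif n == nb_of_commas: # for last substring
--         return s[index_of_commas[n-1]+2:] # [before last comma + 2:]
-- ===== SOURCE B (Python) =====
-- def get_nth_word_from_string(s, n):
--     parts = s.split(',')
--     if n < 0 or n >= len(parts):
--         return ''
--     if n == 0:
--         return parts[0]
--     return parts[n][1:]
-- ===== Notes on version B (the rewrite author's own statement) =====
-- stated objective: simpler
-- what changed: Replaced A's manual loop that collects every comma index plus three index-arithmetic slicing branches by a single s.split(',') followed by one bounds check, parts[0] for n==0 and parts[n][1:] otherwise.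
import Mathlib
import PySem

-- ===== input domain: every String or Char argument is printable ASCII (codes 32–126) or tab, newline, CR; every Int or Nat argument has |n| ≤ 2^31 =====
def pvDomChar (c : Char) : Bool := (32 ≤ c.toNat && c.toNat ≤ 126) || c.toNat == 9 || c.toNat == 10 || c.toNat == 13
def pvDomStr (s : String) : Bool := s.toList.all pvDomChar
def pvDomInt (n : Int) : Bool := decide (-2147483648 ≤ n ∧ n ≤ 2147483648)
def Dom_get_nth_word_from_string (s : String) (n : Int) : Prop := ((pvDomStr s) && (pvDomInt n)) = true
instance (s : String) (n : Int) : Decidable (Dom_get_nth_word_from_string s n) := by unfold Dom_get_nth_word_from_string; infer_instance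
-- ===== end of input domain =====

-- B replaces A's manual comma-index loop and three slicing branches by split(',') plus one
-- index/strip; objective: simpler. Both are total; proved equal on all inputs of the domain.

-- ===== PORT A =====
-- A: one pass collecting the indexes (and the count) of the commas, then slice by branch.
def get_nth_word_from_string (s : String) (n : Int) : String :=
  let cs := s.toList
  let st := (PySem.List.pyRange 0 (PySem.Str.len s) 1).foldl
    (fun (acc : List Int × Int) i =>
      if PySem.List.pyGetD cs i ' ' = ',' then (acc.1 ++ [i], acc.2 + 1) else acc)
    ([], 0)
  let index_of_commas := st.1
  let nb_of_commas := st.2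
  if n > nb_of_commas ∨ n < 0 then ""
  else if n = 0 then
    if nb_of_commas = 0 then s
    else String.ofList (PySem.List.slice cs none (some (PySem.List.pyGetD index_of_commas n 0)))
  else if n > 0 ∧ n ≤ nb_of_commas - 1 then
    String.ofList (PySem.List.slice cs (some (PySem.List.pyGetD index_of_commas (n - 1) 0 + 2))
      (some (PySem.List.pyGetD index_of_commas n 0)))
  else
    String.ofList (PySem.List.slice cs (some (PySem.List.pyGetD index_of_commas (n - 1) 0 + 2)) none)

-- ===== PORT B =====
-- B: parts = s.split(','); '' when n is out of range, parts[0] for n == 0, else parts[n][1:].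
def get_nth_word_from_string_alt (s : String) (n : Int) : String :=
  let parts := PySem.Chars.splitOn s.toList [',']
  if n < 0 ∨ (parts.length : Int) ≤ n then ""
  else if n = 0 then String.ofList (PySem.List.pyGetD parts n [])
  else String.ofList (PySem.List.slice (PySem.List.pyGetD parts n []) (some 1) none)

-- ===== PRECONDITION & SPEC =====
def Spec_get_nth_word_from_string (s : String) (n : Int) (out : String) : Prop := out = get_nth_word_from_string_alt s n
instance (s : String) (n : Int) (out : String) : Decidable (Spec_get_nth_word_from_string s n out) := by unfold Spec_get_nth_word_from_string; infer_instance

-- ===== CLAIM (what is proved, stated in full; the proofs are below) =====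
def Claim_equal_get_nth_word_from_string : Prop := ∀ (s : String) (n : Int), Dom_get_nth_word_from_string s n → Spec_get_nth_word_from_string s n (get_nth_word_from_string s n)

-- ===== LEMMAS AND PROOFS =====

-- prepend x onto the first piece (Python-split bookkeeping)
def pvGlue (x : List Char) : List (List Char) → List (List Char)
  | [] => [x]
  | h :: t => (x ++ h) :: t

-- structural form of s.split(',')
def pvSplit1 : List Char → List (List Char)
  | [] => [[]]
  | c :: r => if c = ',' then [] :: pvSplit1 r else pvGlue [c] (pvSplit1 r)

-- the (Nat) positions of the commas
def pvIdx : List Char → List Nat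
  | [] => []
  | c :: r => if c = ',' then 0 :: (pvIdx r).map (· + 1) else (pvIdx r).map (· + 1)

-- start/stop (in Nat positions) of the k-th comma-separated piece
def pvStart (cs : List Char) (k : Nat) : Nat :=
  if k = 0 then 0 else ((pvIdx cs)[k-1]?.getD 0) + 1

def pvStop (cs : List Char) (k : Nat) : Nat :=
  (pvIdx cs)[k]?.getD cs.length

lemma pvSplit1_ne_nil (cs : List Char) : pvSplit1 cs ≠ [] := by
  cases cs with
  | nil => simp [pvSplit1]
  | cons c r =>
    simp only [pvSplit1]
    split
    · simp
    · cases h : pvSplit1 r <;> simp [pvGlue]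

lemma pvGlue_nil_of_ne_nil {l : List (List Char)} (h : l ≠ []) : pvGlue [] l = l := by
  cases l with
  | nil => exact absurd rfl h
  | cons a t => simp [pvGlue]

lemma pvGlue_pvGlue (x : List Char) (c : Char) (l : List (List Char)) :
    pvGlue x (pvGlue [c] l) = pvGlue (x ++ [c]) l := by
  cases l <;> simp [pvGlue]

lemma go_eq (fuel : Nat) (l cur : List Char) (acc : List (List Char)) (h : l.length < fuel) :
    PySem.Chars.splitOn.go [','] fuel l cur acc
      = acc.reverse ++ pvGlue cur.reverse (pvSplit1 l) := by
  induction fuel generalizing l cur acc with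
  | zero => omega
  | succ f ih =>
    cases l with
    | nil => simp [PySem.Chars.splitOn.go, pvSplit1, pvGlue]
    | cons c rest =>
      by_cases hc : c = ','
      · subst hc
        have hpre : List.isPrefixOf [','] (',' :: rest) = true := by
          simp [List.isPrefixOf]
        simp only [PySem.Chars.splitOn.go, hpre, if_pos]
        rw [ih _ _ _ (by simpa using Nat.lt_of_succ_lt_succ h)]
        cases hsp : pvSplit1 rest with
        | nil => exact absurd hsp (pvSplit1_ne_nil rest)
        | cons p t => simp [pvSplit1, pvGlue, hsp]
      · have hpre : List.isPrefixOf [','] (c :: rest) = false := by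
          simp [List.isPrefixOf]
          exact fun hh => hc hh.symm
        simp only [PySem.Chars.splitOn.go, hpre, Bool.false_eq_true, if_false]
        rw [ih _ _ _ (by simpa using Nat.lt_of_succ_lt_succ h)]
        simp [pvSplit1, hc, pvGlue_pvGlue]

lemma splitOn_comma (cs : List Char) : PySem.Chars.splitOn cs [','] = pvSplit1 cs := by
  unfold PySem.Chars.splitOn
  rw [go_eq _ _ _ _ (by omega)]
  simp [pvGlue_nil_of_ne_nil (pvSplit1_ne_nil cs)]

lemma pvSplit1_length (cs : List Char) : (pvSplit1 cs).length = (pvIdx cs).length + 1 := by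
  induction cs with
  | nil => simp [pvSplit1, pvIdx]
  | cons c r ih =>
    by_cases hc : c = ','
    · simp [pvSplit1, pvIdx, hc, ih]
    · simp only [pvSplit1, pvIdx, hc, if_false]
      cases h : pvSplit1 r with
      | nil => exact absurd h (pvSplit1_ne_nil r)
      | cons p t => simp [pvGlue, ← ih, h]

lemma map_shift (s0 : Int) (t : List Nat) :
    List.map (fun (j : Nat) => s0 + (j : Int)) (t.map (· + 1))
      = List.map (fun (j : Nat) => s0 + 1 + (j : Int)) t := by
  rw [List.map_map]
  apply List.map_congr_left
  intro j _
  simp only [Function.comp_apply]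
  push_cast
  ring

lemma loop_eq (cs : List Char) (s0 : Int) (aI : List Int) (aN : Int) :
    (PySem.List.enumerate cs s0).foldl
        (fun (acc : List Int × Int) p => if p.2 = ',' then (acc.1 ++ [p.1], acc.2 + 1) else acc)
        (aI, aN)
      = (aI ++ (pvIdx cs).map (fun (j : Nat) => s0 + (j : Int)), aN + (pvIdx cs).length) := by
  induction cs generalizing s0 aI aN with
  | nil => simp [PySem.List.enumerate_nil, pvIdx]
  | cons c r ih =>
    rw [PySem.List.enumerate_cons, List.foldl_cons]
    by_cases hc : c = ','
    · subst hc
      rw [if_pos rfl, ih]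
      refine Prod.ext ?_ ?_
      · show aI ++ [s0] ++ _ = _
        rw [pvIdx, if_pos rfl, List.map_cons, map_shift, List.append_assoc]
        simp
      · show aN + 1 + _ = _
        rw [pvIdx, if_pos rfl]
        simp
        omega
    · rw [if_neg (by simpa using hc), ih]
      refine Prod.ext ?_ ?_
      · show aI ++ _ = _
        rw [pvIdx, if_neg hc, map_shift]
      · show aN + _ = _
        rw [pvIdx, if_neg hc]
        simp

lemma parts_spec (cs : List Char) (k : Nat) (hk : k ≤ (pvIdx cs).length) :
    (pvSplit1 cs)[k]? = some ((cs.drop (pvStart cs k)).take (pvStop cs k - pvStart cs k)) := by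
  induction cs generalizing k with
  | nil =>
    simp [pvIdx] at hk
    subst hk
    simp [pvSplit1, pvStart, pvStop, pvIdx]
  | cons c r ih =>
    by_cases hc : c = ','
    · subst hc
      rw [pvSplit1, if_pos rfl]
      cases k with
      | zero => simp [pvStart, pvStop, pvIdx]
      | succ j =>
        rw [pvIdx, if_pos rfl] at hk
        have hj : j ≤ (pvIdx r).length := by simpa using hk
        rw [List.getElem?_cons_succ, ih j hj]
        congr 1
        have hstart : pvStart (',' :: r) (j+1) = pvStart r j + 1 := by
          cases j with
          | zero => simp [pvStart, pvIdx]
          | succ i =>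
            have hi : i < (pvIdx r).length := by omega
            simp [pvStart, pvIdx, List.getElem?_map, List.getElem?_eq_getElem hi]
        have hstop : pvStop (',' :: r) (j+1) = pvStop r j + 1 := by
          by_cases hjl : j < (pvIdx r).length
          · simp [pvStop, pvIdx, List.getElem?_map, List.getElem?_eq_getElem hjl]
          · have h1 : (pvIdx r)[j]? = none := by
              simp; omega
            have h2 : ((pvIdx r).map (· + 1))[j]? = none := by
              simp; omega
            simp [pvStop, pvIdx, h1, h2]
        rw [hstart, hstop]
        simp [List.drop_succ_cons, Nat.succ_sub_succ]
    · rw [pvSplit1, if_neg hc]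
      have hlen : (pvIdx (c :: r)).length = (pvIdx r).length := by
        rw [pvIdx, if_neg hc]; simp
      cases hr : pvSplit1 r with
      | nil => exact absurd hr (pvSplit1_ne_nil r)
      | cons p t =>
        cases k with
        | zero =>
          have h0 := ih 0 (by omega)
          rw [hr] at h0
          simp only [List.getElem?_cons_zero, Option.some.injEq] at h0
          simp only [pvGlue, List.getElem?_cons_zero, Option.some.injEq]
          have hstart : pvStart (c :: r) 0 = 0 := by simp [pvStart]
          rw [hstart]
          simp only [List.drop_zero, Nat.sub_zero]
          cases hix : pvIdx r with
          | nil =>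
            have hstop : pvStop (c :: r) 0 = r.length + 1 := by
              simp [pvStop, pvIdx, hc, hix]
            rw [hstop]
            have h2 : pvStop r 0 = r.length := by simp [pvStop, hix]
            rw [h2, pvStart, if_pos rfl, List.drop_zero, Nat.sub_zero] at h0
            simp [List.take_succ_cons, h0, List.take_length]
          | cons i it =>
            have hstop : pvStop (c :: r) 0 = i + 1 := by
              simp [pvStop, pvIdx, hc, hix]
            rw [hstop]
            have h2 : pvStop r 0 = i := by simp [pvStop, hix]
            rw [h2, pvStart, if_pos rfl, List.drop_zero, Nat.sub_zero] at h0
            simp [List.take_succ_cons, h0]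
        | succ j =>
          simp only [pvGlue, List.getElem?_cons_succ]
          have hj1 : j + 1 ≤ (pvIdx r).length := by omega
          have h1 := ih (j+1) hj1
          rw [hr] at h1
          simp only [List.getElem?_cons_succ] at h1
          rw [h1]
          congr 1
          have hstart : pvStart (c :: r) (j+1) = pvStart r (j+1) + 1 := by
            have hjlt : j < (pvIdx r).length := by omega
            simp [pvStart, pvIdx, hc, List.getElem?_map, List.getElem?_eq_getElem hjlt]
          have hstop : pvStop (c :: r) (j+1) = pvStop r (j+1) + 1 := by
            by_cases hjl : j + 1 < (pvIdx r).length
            · simp [pvStop, pvIdx, hc, List.getElem?_map, List.getElem?_eq_getElem hjl]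
            · have h2 : (pvIdx r)[j+1]? = none := by
                simp; omega
              have h3 : ((pvIdx r).map (· + 1))[j+1]? = none := by
                simp; omega
              simp [pvStop, pvIdx, hc, h2, h3]
          rw [hstart, hstop]
          simp [List.drop_succ_cons, Nat.succ_sub_succ]

lemma getD_map_cast (idx : List Nat) (k : Nat) (h : k < idx.length) :
    (idx.map (fun (j : Nat) => (j : Int))).getD k 0 = (idx[k] : Int) := by
  rw [List.getD_eq_getElem _ _ (by simpa using h)]
  simp

-- ===== VERDICT (by name: the statement is the Claim_ definition above) =====
theorem get_nth_word_from_string_spec : Claim_equal_get_nth_word_from_string := by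
  intro s n _
  unfold Spec_get_nth_word_from_string get_nth_word_from_string get_nth_word_from_string_alt
  have h1 := loop_eq s.toList 0 [] 0
  rw [PySem.List.enumerate_eq_map_pyRange s.toList ' ', List.foldl_map] at h1
  simp only [List.nil_append, zero_add] at h1
  simp only [PySem.List.len_eq] at h1
  simp only [splitOn_comma, PySem.Str.len_eq]
  rw [h1]
  simp only
  set cs := s.toList with hcs
  set idx := pvIdx cs with hidx
  set m := idx.length with hm
  set parts := pvSplit1 cs with hparts
  have hplen : parts.length = m + 1 := pvSplit1_length cs
  by_cases hout : n > (m : Int) ∨ n < 0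
  · rw [if_pos hout,
      if_pos (show (n < 0 ∨ ((parts.length : Int) ≤ n)) by rw [hplen]; push_cast; omega)]
  · rw [if_neg hout,
      if_neg (show ¬(n < 0 ∨ ((parts.length : Int) ≤ n)) by rw [hplen]; push_cast; omega)]
    have hn0 : 0 ≤ n := by omega
    have hnm : n ≤ (m : Int) := by omega
    by_cases hz : n = 0
    · subst hz
      rw [if_pos rfl, if_pos rfl]
      have hp0 := parts_spec cs 0 (Nat.zero_le _)
      rw [← hparts] at hp0
      have hB : PySem.List.pyGetD parts 0 [] = (cs.take (pvStop cs 0)) := by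
        rw [PySem.List.pyGetD_of_nonneg _ _ le_rfl]
        rw [show ((0:Int).toNat) = 0 from rfl]
        rw [List.getD_eq_getElem?_getD, hp0]
        simp [pvStart]
      by_cases hm0 : m = 0
      · rw [if_pos (by exact_mod_cast hm0)]
        have hidx0 : idx = [] := List.length_eq_zero_iff.mp hm0
        rw [hB]
        have hstop : pvStop cs 0 = cs.length := by
          rw [pvStop, ← hidx, hidx0]
          simp
        rw [hstop, List.take_length]
        simp [hcs]
      · rw [if_neg (by exact_mod_cast hm0)]
        have h0m : 0 < m := Nat.pos_of_ne_zero hm0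
        have hA : PySem.List.pyGetD (idx.map (fun (j : Nat) => (j : Int))) 0 0
            = ((idx[0]'h0m : Nat) : Int) := by
          rw [PySem.List.pyGetD_of_nonneg _ _ le_rfl]
          rw [show ((0:Int).toNat) = 0 from rfl]
          exact getD_map_cast idx 0 h0m
        rw [hA, PySem.List.slice_to_natCast, hB]
        have hstop : pvStop cs 0 = idx[0]'h0m := by
          rw [pvStop, ← hidx]
          simp [List.getElem?_eq_getElem h0m]
        rw [hstop]
    · rw [if_neg hz, if_neg hz]
      set k := n.toNat with hk
      have hnk : n = (k : Int) := by omega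
      have hkm1 : k - 1 < m := by omega
      have hn1 : n - 1 = ((k - 1 : Nat) : Int) := by omega
      have hA1 : PySem.List.pyGetD (idx.map (fun (j : Nat) => (j : Int))) (n - 1) 0
          = ((idx[k-1]'hkm1 : Nat) : Int) := by
        rw [hn1, PySem.List.pyGetD_natCast]
        exact getD_map_cast idx (k-1) hkm1
      have hp := parts_spec cs k (by rw [← hidx, ← hm]; omega)
      rw [← hparts] at hp
      have hstart : pvStart cs k = idx[k-1]'hkm1 + 1 := by
        rw [pvStart, if_neg (show ¬(k = 0) by omega)]
        rw [← hidx]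
        simp [List.getElem?_eq_getElem hkm1]
      have hB : PySem.List.pyGetD parts n []
          = (cs.drop (idx[k-1]'hkm1 + 1)).take (pvStop cs k - (idx[k-1]'hkm1 + 1)) := by
        rw [hnk, PySem.List.pyGetD_natCast, List.getD_eq_getElem?_getD, hp, hstart]
        simp
      rw [hA1, hB, PySem.List.slice_from_one]
      have hcast : ((idx[k-1]'hkm1 : Nat) : Int) + 2 = ((idx[k-1]'hkm1 + 2 : Nat) : Int) := by
        push_cast; ring
      have htail : ((cs.drop (idx[k-1]'hkm1 + 1)).take (pvStop cs k - (idx[k-1]'hkm1 + 1))).tail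
          = (cs.drop (idx[k-1]'hkm1 + 2)).take (pvStop cs k - (idx[k-1]'hkm1 + 2)) := by
        have h2 : pvStop cs k - (idx[k-1]'hkm1 + 1) - 1 = pvStop cs k - (idx[k-1]'hkm1 + 2) := by
          omega
        have h3 : idx[k-1]'hkm1 + 1 + 1 = idx[k-1]'hkm1 + 2 := by omega
        rw [← List.drop_one, List.drop_take, List.drop_drop, h2, h3]
      rw [htail]
      by_cases hmid : k < m
      · rw [if_pos (show n > 0 ∧ n ≤ (m : Int) - 1 from ⟨by omega, by omega⟩)]
        have hA2 : PySem.List.pyGetD (idx.map (fun (j : Nat) => (j : Int))) n 0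
            = ((idx[k]'hmid : Nat) : Int) := by
          rw [hnk, PySem.List.pyGetD_natCast]
          exact getD_map_cast idx k hmid
        rw [hA2]
        have hstop : pvStop cs k = idx[k]'hmid := by
          rw [pvStop, ← hidx]
          simp [List.getElem?_eq_getElem hmid]
        rw [hstop, hcast, PySem.List.slice_natCast]
      · rw [if_neg (show ¬(n > 0 ∧ n ≤ (m : Int) - 1) from fun h => by omega)]
        have hstop : pvStop cs k = cs.length := by
          rw [pvStop, ← hidx]
          have hnone : idx[k]? = none := by simp; omega
          rw [hnone]
          rfl
        rw [hstop, hcast, PySem.List.slice_from_natCast]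
        rw [List.take_of_length_le (by rw [List.length_drop])]
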